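-- pv_equiv track=rewrite | github.com/jkao1/mks22 | mks22-hw0405.py | Esrever
-- ===== SOURCE A (Python) =====
-- def Esrever(L):
--     output = []
--     for string in L:
--         new_string = ''
--         i = len(string)
--         while i > 0: # not >= b/c i -= 1 goes before the function
--             i -= 1
--             new_string += string[i]
--         output.append(new_string)
--     return output
-- ===== SOURCE B (Python) =====
-- def Esrever(L):
--     output = []
--     for s in L:
--         chars = list(s)
--         left = 0
--         right = len(chars) - 1
--         while left < right:
--             chars[left], chars[right] = chars[right], chars[left]
--             left += 1
--             right -= 1
--         output.append(''.join(chars))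
--     return output
-- ===== Notes on version B (the rewrite author's own statement) =====
-- stated objective: alternative
-- what changed: B reverses each string in place on a mutable char list with a two-pointer swap loop meeting in the middle (~n/2 swaps) instead of A's backward index loop building a new string by repeated concatenation.
import Mathlib
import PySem

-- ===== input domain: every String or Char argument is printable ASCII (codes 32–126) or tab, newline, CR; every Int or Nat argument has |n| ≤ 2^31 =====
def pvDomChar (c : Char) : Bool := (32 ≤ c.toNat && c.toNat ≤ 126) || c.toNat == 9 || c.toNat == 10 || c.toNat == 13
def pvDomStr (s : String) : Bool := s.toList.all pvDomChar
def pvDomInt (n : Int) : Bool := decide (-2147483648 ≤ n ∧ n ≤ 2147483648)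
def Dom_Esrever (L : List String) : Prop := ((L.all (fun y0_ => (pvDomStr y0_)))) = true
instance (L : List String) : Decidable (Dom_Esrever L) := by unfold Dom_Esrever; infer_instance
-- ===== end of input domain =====

-- B reverses each string with a two-pointer swap loop on a mutable char buffer; A builds each
-- reversed string by a backward index loop with repeated concatenation. Same result, different mechanism.

-- ===== PORT A =====
-- A's inner while loop: i counts down from len(string) to 0, appending string[i] each step.
-- string[i] is always in range here, so getD with a dummy default is exact.
def aLoop (cs : List Char) : Nat → List Char → List Char
  | 0, acc => acc
  | i+1, acc => aLoop cs i (acc ++ [cs.getD i ' '])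

def Esrever (L : List String) : List String :=
  L.foldl (fun output s => output ++ [String.ofList (aLoop s.toList s.toList.length [])]) []

-- ===== PORT B =====
-- chars[left], chars[right] = chars[right], chars[left]  (both reads from the pre-swap list)
def swapL (cs : List Char) (l r : Nat) : List Char :=
  (cs.set l (cs.getD r ' ')).set r (cs.getD l ' ')

-- the two-pointer while loop: swap ends, move inward until the pointers meet
def twoPtrL (cs : List Char) (l r : Nat) : List Char :=
  if _h : l < r then twoPtrL (swapL cs l r) (l+1) (r-1) else cs
  termination_by r - l
  decreasing_by omega

def Esrever_alt (L : List String) : List String :=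
  L.map (fun s => String.ofList (twoPtrL s.toList 0 (s.toList.length - 1)))

-- ===== PRECONDITION & SPEC =====
def Spec_Esrever (L : List String) (out : List String) : Prop := out = Esrever_alt L
instance (L : List String) (out : List String) : Decidable (Spec_Esrever L out) := by unfold Spec_Esrever; infer_instance

-- ===== CLAIM (what is proved, stated in full; the proofs are below) =====
def Claim_equal_Esrever : Prop := ∀ (L : List String), Dom_Esrever L → Spec_Esrever L (Esrever L)

-- ===== LEMMAS AND PROOFS =====

theorem aLoop_eq (cs : List Char) : ∀ (i : Nat) (acc : List Char), i ≤ cs.length →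
    aLoop cs i acc = acc ++ (cs.take i).reverse := by
  intro i
  induction i with
  | zero => intro acc _; simp [aLoop]
  | succ n ih =>
    intro acc h
    have hn : n < cs.length := by omega
    rw [aLoop, ih _ (by omega)]
    have ht : cs.take (n+1) = (cs.take n).concat cs[n] := (List.take_concat_get ..).symm
    rw [ht, List.concat_eq_append, List.reverse_append]
    simp [List.getD, List.getElem?_eq_getElem hn]

theorem aLoop_rev (cs : List Char) : aLoop cs cs.length [] = cs.reverse := by
  rw [aLoop_eq cs cs.length [] le_rfl]; simp

theorem swapL_length (cs : List Char) (l r : Nat) : (swapL cs l r).length = cs.length := by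
  simp [swapL]

theorem twoPtrL_length (cs : List Char) (l r : Nat) : (twoPtrL cs l r).length = cs.length := by
  fun_induction twoPtrL cs l r with
  | case1 cs l r h ih => rw [ih, swapL_length]
  | case2 => rfl

theorem swapL_getD (cs : List Char) (l r i : Nat) (hl : l < cs.length) (hr : r < cs.length) :
    (swapL cs l r).getD i ' ' =
      if i = r then cs.getD l ' ' else if i = l then cs.getD r ' ' else cs.getD i ' ' := by
  simp only [swapL, List.getD, List.getElem?_set]
  by_cases h1 : i = r <;> by_cases h2 : i = l <;>
    simp only [h1, h2, if_pos, eq_comm] <;>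
    split_ifs <;> simp_all

theorem twoPtrL_getD (cs : List Char) (l r : Nat) :
    r < cs.length → ∀ (i : Nat),
    (twoPtrL cs l r).getD i ' ' =
      if l ≤ i ∧ i ≤ r then cs.getD (l + r - i) ' ' else cs.getD i ' ' := by
  fun_induction twoPtrL cs l r with
  | case1 cs l r h ih =>
    intro hr i
    have hlen : (swapL cs l r).length = cs.length := swapL_length cs l r
    rw [ih (by omega) i]
    have hl : l < cs.length := by omega
    by_cases hc : l + 1 ≤ i ∧ i ≤ r - 1
    · -- strictly inside: the swap did not touch position i nor l+r-i
      have h1 : l + 1 + (r - 1) - i = l + r - i := by omega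
      rw [if_pos hc, if_pos (by omega : l ≤ i ∧ i ≤ r), h1,
        swapL_getD cs l r _ hl hr]
      rw [if_neg (by omega), if_neg (by omega)]
    · rw [if_neg hc, swapL_getD cs l r _ hl hr]
      by_cases h1 : i = r
      · rw [if_pos h1, if_pos (by omega : l ≤ i ∧ i ≤ r)]
        congr 1; omega
      · rw [if_neg h1]
        by_cases h2 : i = l
        · rw [if_pos h2, if_pos (by omega : l ≤ i ∧ i ≤ r)]
          congr 1; omega
        · rw [if_neg h2, if_neg (by omega)]
  | case2 cs l r h =>
    intro hr i
    by_cases hc : l ≤ i ∧ i ≤ r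
    · rw [if_pos hc]; congr 1; omega
    · rw [if_neg hc]

theorem twoPtrL_rev (cs : List Char) : twoPtrL cs 0 (cs.length - 1) = cs.reverse := by
  cases cs with
  | nil => simp [twoPtrL]
  | cons c t =>
    set cs := c :: t with hcs
    have hlen : cs.length ≥ 1 := by simp [hcs]
    have hr : cs.length - 1 < cs.length := by omega
    apply List.ext_getElem
    · rw [twoPtrL_length]; simp
    · intro i h1 h2
      have hi : i < cs.length := by rwa [twoPtrL_length] at h1
      have e1 : (twoPtrL cs 0 (cs.length - 1))[i] =
          (twoPtrL cs 0 (cs.length - 1)).getD i ' ' := by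
        rw [List.getD_eq_getElem _ _ h1]
      rw [e1, twoPtrL_getD cs 0 (cs.length - 1) hr i,
        if_pos (by omega : 0 ≤ i ∧ i ≤ cs.length - 1)]
      rw [List.getD_eq_getElem _ _ (by omega : 0 + (cs.length - 1) - i < cs.length)]
      rw [List.getElem_reverse]
      congr 1; omega

theorem foldl_append_map (f : String → String) (L : List String) :
    ∀ acc : List String, L.foldl (fun output s => output ++ [f s]) acc = acc ++ L.map f := by
  induction L with
  | nil => intro acc; simp
  | cons s t ih => intro acc; simp [List.foldl, ih]

-- ===== VERDICT (by name: the statement is the Claim_ definition above) =====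
theorem Esrever_spec : Claim_equal_Esrever := by
  intro L _
  unfold Spec_Esrever Esrever Esrever_alt
  rw [foldl_append_map]
  simp only [List.nil_append]
  apply List.map_congr_left
  intro s _
  rw [aLoop_rev, twoPtrL_rev]
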